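-- pv_equiv track=rewrite | github.com/Serhioromano/eplan-2.9-docs-ru | tools/fix_api_codeblocks.py | split_code_sections
-- ===== SOURCE A (Python) =====
-- def split_code_sections(lines: list[str]) -> list[list[str]]:
--     """Split a list of stripped lines into code sections at 2+ blank-line runs."""
--     sections: list[list[str]] = []
--     current: list[str] = []
--     blank_run = 0
--
--     for line in lines:
--         if line.strip() == "":
--             blank_run += 1
--         else:
--             if blank_run >= 2 and current:
--                 # End of a section, start a new one
--                 sections.append(current)
--                 current = []
--             elif blank_run == 1 and current:
--                 current.append("")  # keep single blank lines within code
--             blank_run = 0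
--             current.append(line)
--
--     if current:
--         sections.append(current)
--
--     return sections
-- ===== SOURCE B (Python) =====
-- def split_code_sections(lines: list[str]) -> list[list[str]]:
--     """Split stripped lines into code sections: work only on the non-blank
--     lines, using the index gap between consecutive non-blank lines
--     (gap >= 2 splits sections, gap == 1 keeps a single '')."""
--     nonblank = [(i, line) for i, line in enumerate(lines) if line.strip() != ""]
--     sections: list[list[str]] = []
--     section: list[str] = []
--     prev = None
--     for i, line in nonblank:
--         if prev is None:
--             section = [line]
--         else:
--             gap = i - prev - 1
--             if gap >= 2:
--                 sections.append(section)
--                 section = [line]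
--             elif gap == 1:
--                 section += ["", line]
--             else:
--                 section.append(line)
--         prev = i
--     if section:
--         sections.append(section)
--     return sections
-- ===== Notes on version B (the rewrite author's own statement) =====
-- stated objective: alternative
-- what changed: B first filters out every blank line, keeping only the non-blank lines paired with their indices, then folds over that filtered list deciding split/keep-'' purely from the arithmetic index gap between consecutive non-blank lines (gap>=2 splits, gap==1 inserts ''), so there is no blank-run counter and blank lines never reach the main loop.
import Mathlib
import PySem

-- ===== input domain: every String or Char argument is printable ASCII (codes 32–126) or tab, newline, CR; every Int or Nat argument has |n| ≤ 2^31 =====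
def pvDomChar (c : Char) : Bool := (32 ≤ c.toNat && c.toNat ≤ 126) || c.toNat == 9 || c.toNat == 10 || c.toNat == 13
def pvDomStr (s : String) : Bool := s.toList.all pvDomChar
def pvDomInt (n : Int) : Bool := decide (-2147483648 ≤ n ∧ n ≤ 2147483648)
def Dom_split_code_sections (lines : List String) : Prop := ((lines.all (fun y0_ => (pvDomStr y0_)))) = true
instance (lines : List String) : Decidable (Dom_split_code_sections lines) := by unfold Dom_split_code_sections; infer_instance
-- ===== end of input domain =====

-- B filters the input down to the non-blank lines with their indices and decides
-- splits from the index gap between consecutive non-blank lines, instead of A's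
-- line-by-line loop with a blank-run counter; same cost, different algorithm.

-- ===== PORT A =====
-- loop body of A: state = (sections, current, blank_run)
def pvStepA (st : List (List String) × List String × Nat) (line : String) :
    List (List String) × List String × Nat :=
  let (sections, current, blank_run) := st
  if PySem.Str.strip line = "" then
    (sections, current, blank_run + 1)
  else
    let (sections, current) :=
      if blank_run ≥ 2 ∧ current ≠ [] then (sections ++ [current], ([] : List String))
      else if blank_run = 1 ∧ current ≠ [] then (sections, current ++ [""])
      else (sections, current)
    (sections, current ++ [line], 0)

def split_code_sections (lines : List String) : List (List String) :=
  let st := lines.foldl pvStepA ([], [], 0)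
  let sections := st.1
  let current := st.2.1
  if current ≠ [] then sections ++ [current] else sections

-- ===== PORT B =====
-- nonblank = [(i, line) for i, line in enumerate(lines) if line.strip() != ""]
def pvNonBlank (lines : List String) : List (Int × String) :=
  (PySem.List.enumerate lines).filter (fun p => !(PySem.Str.strip p.2 == ""))

-- loop body of B: state = (sections, section, prev)
def pvStepB (st : List (List String) × List String × Option Int) (p : Int × String) :
    List (List String) × List String × Option Int :=
  let (sections, cur, prev) := st
  match prev with
  | none => (sections, [p.2], some p.1)
  | some q =>
      let gap : Int := p.1 - q - 1
      if gap ≥ 2 then (sections ++ [cur], [p.2], some p.1)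
      else if gap = 1 then (sections, cur ++ ["", p.2], some p.1)
      else (sections, cur ++ [p.2], some p.1)

def split_code_sections_alt (lines : List String) : List (List String) :=
  let st := (pvNonBlank lines).foldl pvStepB ([], [], none)
  let sections := st.1
  let cur := st.2.1
  if cur ≠ [] then sections ++ [cur] else sections

-- ===== PRECONDITION & SPEC =====
def Spec_split_code_sections (lines : List String) (out : List (List String)) : Prop := out = split_code_sections_alt lines
instance (lines : List String) (out : List (List String)) : Decidable (Spec_split_code_sections lines out) := by unfold Spec_split_code_sections; infer_instance

-- ===== CLAIM (what is proved, stated in full; the proofs are below) =====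
def Claim_equal_split_code_sections : Prop := ∀ (lines : List String), Dom_split_code_sections lines → Spec_split_code_sections lines (split_code_sections lines)

-- ===== LEMMAS AND PROOFS =====

-- shared finalizer (proof helper): append the pending section if non-empty
def pvFin {α : Type} (st : List (List String) × List String × α) : List (List String) :=
  if st.2.1 ≠ [] then st.1 ++ [st.2.1] else st.1

-- main invariant: running A's loop on the rest of the lines (indices starting at k)
-- agrees, after finalizing, with B's loop on the non-blank pairs of that rest,
-- provided the states are linked: before any non-blank line both accumulators are
-- empty; after one, prev holds its index q, blank_run = k - 1 - q, current ≠ [].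
theorem pv_fold_eq (lines : List String) (k : Nat) (S : List (List String))
    (C : List String) (b : Nat) (pB : Option Int)
    (hinv : (pB = none ∧ S = [] ∧ C = []) ∨
            (∃ q : Nat, pB = some (q : Int) ∧ q < k ∧ b = k - 1 - q ∧ C ≠ [])) :
    pvFin (lines.foldl pvStepA (S, C, b)) =
    pvFin (((PySem.List.enumerate lines (k : Int)).filter
              (fun p => !(PySem.Str.strip p.2 == ""))).foldl pvStepB (S, C, pB)) := by
  induction lines generalizing k S C b pB with
  | nil =>
    simp [PySem.List.enumerate_nil, pvFin]
  | cons x xs ih =>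
    rw [PySem.List.enumerate_cons]
    by_cases hx : PySem.Str.strip x = ""
    · -- blank line: A bumps the counter, B's filter drops it
      simp only [List.foldl_cons, List.filter_cons, hx]
      simp only [pvStepA, if_pos hx, beq_self_eq_true, Bool.not_true, if_neg Bool.false_ne_true]
      have : ((k : Int) + 1) = ((k + 1 : Nat) : Int) := by push_cast; ring
      rw [this]
      apply ih
      rcases hinv with ⟨hp, hS, hC⟩ | ⟨q, hp, hq, hb, hC⟩
      · exact Or.inl ⟨hp, hS, hC⟩
      · exact Or.inr ⟨q, hp, by omega, by omega, hC⟩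
    · -- non-blank line: both sides take one real step
      have hxb : (!(PySem.Str.strip x == "")) = true := by simp [hx]
      simp only [List.foldl_cons, List.filter_cons, hxb, if_true]
      have hcast : ((k : Int) + 1) = ((k + 1 : Nat) : Int) := by push_cast; ring
      rcases hinv with ⟨hp, hS, hC⟩ | ⟨q, hp, hq, hb, hC⟩
      · subst hp; subst hS; subst hC
        simp only [pvStepA, if_neg hx, pvStepB]
        simp only [ne_eq, not_true_eq_false, and_false, if_false, List.nil_append]
        rw [hcast]
        exact ih (k + 1) [] [x] 0 (some (k : Int))
          (Or.inr ⟨k, rfl, by omega, by omega, by simp⟩)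
      · subst hp
        subst hb
        simp only [pvStepA, if_neg hx, pvStepB]
        by_cases h2 : k - 1 - q ≥ 2
        · have hb2 : ((k : Int) - (q : Int) - 1) ≥ 2 := by omega
          rw [if_pos ⟨h2, hC⟩, if_pos hb2, hcast]
          exact ih (k + 1) (S ++ [C]) [x] 0 (some (k : Int))
            (Or.inr ⟨k, rfl, by omega, by omega, by simp⟩)
        · by_cases h1 : k - 1 - q = 1
          · have hb2 : ¬ ((k : Int) - (q : Int) - 1) ≥ 2 := by omega
            have hb1 : ((k : Int) - (q : Int) - 1) = 1 := by omega
            have hA2 : ¬ (k - 1 - q ≥ 2 ∧ C ≠ []) := fun h => h2 h.1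
            rw [if_neg hA2, if_pos ⟨h1, hC⟩, if_neg hb2, if_pos hb1, hcast]
            have hCx : (C ++ [""]) ++ [x] = C ++ ["", x] := by simp
            rw [hCx]
            exact ih (k + 1) S (C ++ ["", x]) 0 (some (k : Int))
              (Or.inr ⟨k, rfl, by omega, by omega, by simp⟩)
          · have hb2 : ¬ ((k : Int) - (q : Int) - 1) ≥ 2 := by omega
            have hb1 : ¬ ((k : Int) - (q : Int) - 1) = 1 := by omega
            have hA2 : ¬ (k - 1 - q ≥ 2 ∧ C ≠ []) := fun h => h2 h.1
            have hA1 : ¬ (k - 1 - q = 1 ∧ C ≠ []) := fun h => h1 h.1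
            rw [if_neg hA2, if_neg hA1, if_neg hb2, if_neg hb1, hcast]
            exact ih (k + 1) S (C ++ [x]) 0 (some (k : Int))
              (Or.inr ⟨k, rfl, by omega, by omega, by simp⟩)

-- ===== VERDICT (by name: the statement is the Claim_ definition above) =====
theorem split_code_sections_spec : Claim_equal_split_code_sections := by
  intro lines _
  unfold Spec_split_code_sections split_code_sections split_code_sections_alt pvNonBlank
  have h := pv_fold_eq lines 0 [] [] 0 none (Or.inl ⟨rfl, rfl, rfl⟩)
  simpa [pvFin, PySem.List.enumerate] using h
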